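-- pv_equiv track=rewrite | github.com/openxjarvis/clawdbot-python | openclaw/auto_reply/reply/commands/commands_info.py | _parse_context_sub
-- ===== SOURCE A (Python) =====
-- def _parse_context_sub(command_body: str) -> str:
--     """Extract sub-command from '/context <sub>' command body."""
--     body = command_body.strip()
--     if body in ("/context", "/context-report"):
--         return ""
--     for prefix in ("/context ", "/context-report "):
--         if body.startswith(prefix):
--             return body[len(prefix):].strip().split()[0].lower() if body[len(prefix):].strip() else ""
--     return ""
-- ===== SOURCE B (Python) =====
-- def _parse_context_sub(command_body: str) -> str:
--     """Extract sub-command from '/context <sub>' command body.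
--
--     Single left-to-right character scan: accumulate the head word up to the
--     first literal space; if that head is a context command, the first
--     whitespace-token of the remainder (lower-cased) is the sub-command.
--     """
--     body = command_body.strip()
--     head = ''
--     for idx, ch in enumerate(body):
--         if ch == ' ':
--             if head in ('/context', '/context-report'):
--                 words = body[idx + 1:].split()
--                 return words[0].lower() if words else ''
--             return ''
--         head += ch
--     return ''
-- ===== Notes on version B (the rewrite author's own statement) =====
-- stated objective: alternative
-- what changed: Replaces the exact-match test plus the two-prefix startswith/slice loop by a single left-to-right character scan that accumulates the word before the first literal space and then tokenizes the remainder once.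
import Mathlib
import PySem

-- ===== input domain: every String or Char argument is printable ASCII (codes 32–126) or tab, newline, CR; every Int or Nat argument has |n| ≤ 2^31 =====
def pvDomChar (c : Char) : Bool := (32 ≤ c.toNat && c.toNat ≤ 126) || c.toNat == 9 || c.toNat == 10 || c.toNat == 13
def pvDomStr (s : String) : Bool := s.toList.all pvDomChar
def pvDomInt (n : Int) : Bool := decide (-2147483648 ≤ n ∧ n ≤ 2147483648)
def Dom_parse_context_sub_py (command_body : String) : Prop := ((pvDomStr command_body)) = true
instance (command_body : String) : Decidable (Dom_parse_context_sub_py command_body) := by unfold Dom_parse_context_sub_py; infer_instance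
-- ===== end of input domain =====

-- B replaces A's exact-match test plus two-prefix startswith/slice loop by a single
-- left-to-right character scan up to the first literal space (objective: alternative).

-- ===== PORT A =====
-- loop body of A's `for prefix in ("/context ", "/context-report ")`, with n = len(prefix):
-- `body[n:].strip().split()[0].lower() if body[n:].strip() else ""`
def pvTailA (body : List Char) (n : Int) : String :=
  let rest := PySem.Chars.strip (PySem.List.slice body (some n) none)
  if rest ≠ [] then
    match PySem.Chars.split₀ rest with
    | w :: _ => String.ofList (PySem.Chars.lower w)
    | [] => ""   -- unreachable: `rest ≠ []` after strip means split() is non-empty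
  else ""

def parse_context_sub_py (command_body : String) : String :=
  let body := PySem.Chars.strip command_body.toList
  if body = "/context".toList ∨ body = "/context-report".toList then ""
  -- the 2-tuple prefix loop, unrolled (first iteration, then second, then fall-through)
  else if PySem.Chars.startswith body "/context ".toList then pvTailA body 9
  else if PySem.Chars.startswith body "/context-report ".toList then pvTailA body 16
  else ""

-- ===== PORT B =====
-- `words = body[idx+1:].split(); return words[0].lower() if words else ''`
def pvSubWord (rest : List Char) : String :=
  match PySem.Chars.split₀ rest with
  | [] => ""
  | w :: _ => String.ofList (PySem.Chars.lower w)

-- B's for-loop: `rem` is the not-yet-scanned part of body, `head` the accumulator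
def pvScanB : List Char → List Char → String
  | [], _ => ""
  | c :: rem, head =>
    if c = ' ' then
      if head = "/context".toList ∨ head = "/context-report".toList then pvSubWord rem
      else ""
    else pvScanB rem (head ++ [c])

def parse_context_sub_py_alt (command_body : String) : String :=
  pvScanB (PySem.Chars.strip command_body.toList) []

-- ===== PRECONDITION & SPEC =====
def Spec_parse_context_sub_py (command_body : String) (out : String) : Prop := out = parse_context_sub_py_alt command_body
instance (command_body : String) (out : String) : Decidable (Spec_parse_context_sub_py command_body out) := by unfold Spec_parse_context_sub_py; infer_instance

-- ===== CLAIM (what is proved, stated in full; the proofs are below) =====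
def Claim_equal_parse_context_sub_py : Prop := ∀ (command_body : String), Dom_parse_context_sub_py command_body → Spec_parse_context_sub_py command_body (parse_context_sub_py command_body)

-- ===== LEMMAS AND PROOFS =====

-- the scan computes: split the (stripped) body at its first literal space
theorem pvScanB_eq (t : List Char) : ∀ head : List Char, pvScanB t head =
    match t.dropWhile (fun c => c != ' ') with
    | [] => ""
    | _ :: v =>
      if head ++ t.takeWhile (fun c => c != ' ') = "/context".toList ∨
         head ++ t.takeWhile (fun c => c != ' ') = "/context-report".toList
      then pvSubWord v else "" := by
  induction t with
  | nil => intro head; simp [pvScanB]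
  | cons c rem ih =>
    intro head
    by_cases hc : c = ' '
    · subst hc; simp [pvScanB]
    · simp [pvScanB, hc, ih (head ++ [c]), List.append_assoc]

theorem pv_takeWhile_mid (u v : List Char) (hu : ∀ x ∈ u, x ≠ ' ') :
    (u ++ ' ' :: v).takeWhile (fun c => c != ' ') = u := by
  induction u with
  | nil => simp
  | cons a u ih =>
    have ha : a ≠ ' ' := hu a (by simp)
    simp [ha, ih (fun x hx => hu x (by simp [hx]))]

theorem pv_dropWhile_idem (p : Char → Bool) (l : List Char) :
    List.dropWhile p (List.dropWhile p l) = List.dropWhile p l := by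
  induction l with
  | nil => simp
  | cons a l ih =>
    by_cases ha : p a = true
    · simpa [ha] using ih
    · simp [ha]

theorem pv_rstrip_idem (s : List Char) :
    PySem.Chars.rstrip (PySem.Chars.rstrip s) = PySem.Chars.rstrip s := by
  simp [PySem.Chars.rstrip, pv_dropWhile_idem]

theorem pv_dropWhile_self_prefix (p : Char → Bool) {l m : List Char}
    (hl : List.dropWhile p l = l) (h : m <+: l) : List.dropWhile p m = m := by
  cases m with
  | nil => simp
  | cons a m =>
    cases l with
    | nil => simp at h
    | cons b l =>
      have hab : a = b := by
        obtain ⟨w, hw⟩ := h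
        simpa using (congrArg (List.head? ·) hw.symm).symm
      subst hab
      have hpa : p a = false := by
        by_contra hp
        have hp' : p a = true := by revert hp; cases p a <;> simp
        rw [List.dropWhile_cons, hp', if_pos rfl] at hl
        have hle := List.length_dropWhile_le p l
        rw [hl] at hle
        simp at hle
      simp [hpa]

theorem pv_rstrip_suffix {t v : List Char} (ht : PySem.Chars.rstrip t = t) (h : v <:+ t) :
    PySem.Chars.rstrip v = v := by
  have ht' : List.dropWhile PySem.Chars.isspace t.reverse = t.reverse := by
    have := congrArg List.reverse ht
    simpa [PySem.Chars.rstrip] using this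
  have hp : v.reverse <+: t.reverse := List.reverse_prefix.mpr h
  have h2 := pv_dropWhile_self_prefix _ ht' hp
  have h3 := congrArg List.reverse h2
  simpa [PySem.Chars.rstrip] using h3

theorem pv_split₀_go_lstrip (v : List Char) (acc : List (List Char)) :
    PySem.Chars.split₀.go (List.dropWhile PySem.Chars.isspace v) [] acc =
    PySem.Chars.split₀.go v [] acc := by
  induction v generalizing acc with
  | nil => simp
  | cons c rest ih =>
    by_cases hc : PySem.Chars.isspace c = true
    · rw [List.dropWhile_cons, if_pos hc, ih]
      conv_rhs => rw [PySem.Chars.split₀.go]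
      simp [hc]
    · simp [hc]

theorem pv_split₀_lstrip (v : List Char) :
    PySem.Chars.split₀ (PySem.Chars.lstrip v) = PySem.Chars.split₀ v := by
  simp [PySem.Chars.split₀, PySem.Chars.lstrip, pv_split₀_go_lstrip]

theorem pv_split₀_go_ne (w : List Char) : ∀ (cur : List Char) (acc : List (List Char)),
    cur ≠ [] ∨ acc ≠ [] → PySem.Chars.split₀.go w cur acc ≠ [] := by
  induction w with
  | nil =>
    intro cur acc h
    rw [PySem.Chars.split₀.go]
    rcases h with h | h
    · simp [List.isEmpty_iff, h]
    · by_cases hc : cur = [] <;> simp [List.isEmpty_iff, hc, h]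
  | cons c rest ih =>
    intro cur acc h
    rw [PySem.Chars.split₀.go]
    by_cases hc : PySem.Chars.isspace c = true
    · by_cases hcur : cur = []
      · subst hcur
        simp [hc]
        exact ih [] acc (by tauto)
      · simp [hc, List.isEmpty_iff, hcur]
        exact ih [] _ (by simp)
    · simp [hc]
      exact ih (c :: cur) acc (by simp)

theorem pv_split₀_nil_iff (v : List Char) :
    PySem.Chars.split₀ v = [] ↔ PySem.Chars.lstrip v = [] := by
  constructor
  · intro h
    by_contra hne
    rcases hl : PySem.Chars.lstrip v with _ | ⟨c, w⟩
    · exact hne hl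
    · have hc : PySem.Chars.isspace c = false := by
        have h0 := List.head?_dropWhile_not PySem.Chars.isspace v
        rw [show List.dropWhile PySem.Chars.isspace v = c :: w from hl] at h0
        simpa using h0
      rw [← pv_split₀_lstrip, hl] at h
      rw [PySem.Chars.split₀] at h
      rw [PySem.Chars.split₀.go] at h
      simp [hc] at h
      exact pv_split₀_go_ne w [c] [] (by simp) h
  · intro h
    rw [← pv_split₀_lstrip, h]
    rw [PySem.Chars.split₀, PySem.Chars.split₀.go]
    simp

-- A's loop body applied to the remainder after the space equals B's `pvSubWord`
theorem pv_tail_eq {t v : List Char} (ht : PySem.Chars.rstrip t = t) (hs : v <:+ t) :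
    (let rest := PySem.Chars.strip v
     if rest ≠ [] then
       match PySem.Chars.split₀ rest with
       | w :: _ => String.ofList (PySem.Chars.lower w)
       | [] => ""
     else "") = pvSubWord v := by
  have hstrip : PySem.Chars.strip v = PySem.Chars.lstrip v := by
    have h1 : PySem.Chars.lstrip v <:+ v := List.dropWhile_suffix _
    exact pv_rstrip_suffix ht (h1.trans hs)
  simp only [hstrip, pv_split₀_lstrip]
  by_cases hlv : PySem.Chars.lstrip v = []
  · have h0 : PySem.Chars.split₀ v = [] := (pv_split₀_nil_iff v).mpr hlv
    simp [hlv, pvSubWord, h0]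
  · have h0 : PySem.Chars.split₀ v ≠ [] := fun h => hlv ((pv_split₀_nil_iff v).mp h)
    rcases hsp : PySem.Chars.split₀ v with _ | ⟨w, ws⟩
    · exact absurd hsp h0
    · simp [hlv, hsp, pvSubWord]

-- ===== VERDICT (by name: the statement is the Claim_ definition above) =====
set_option maxRecDepth 8192 in
theorem parse_context_sub_py_spec : Claim_equal_parse_context_sub_py := by
  intro s _
  unfold Spec_parse_context_sub_py parse_context_sub_py parse_context_sub_py_alt
  rw [pvScanB_eq]
  set t := PySem.Chars.strip s.toList with htdef
  have ht : PySem.Chars.rstrip t = t := by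
    rw [htdef, PySem.Chars.strip]; exact pv_rstrip_idem _
  cases hdr : t.dropWhile (fun c => c != ' ') with
  | nil =>
    have hall : ∀ x ∈ t, x ≠ ' ' := by
      intro x hx
      have := (List.dropWhile_eq_nil_iff.mp hdr) x hx
      simpa using this
    have h8 : PySem.Chars.startswith t "/context ".toList = false := by
      by_contra hb
      have hb' : "/context ".toList <+: t :=
        (PySem.Chars.startswith_iff t _).mp (by revert hb; cases PySem.Chars.startswith t "/context ".toList <;> simp)
      exact hall ' ' (hb'.subset (by decide)) rfl
    have h16 : PySem.Chars.startswith t "/context-report ".toList = false := by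
      by_contra hb
      have hb' : "/context-report ".toList <+: t :=
        (PySem.Chars.startswith_iff t _).mp (by revert hb; cases PySem.Chars.startswith t "/context-report ".toList <;> simp)
      exact hall ' ' (hb'.subset (by decide)) rfl
    by_cases hex : t = "/context".toList ∨ t = "/context-report".toList
    · rw [if_pos hex]
    · rw [if_neg hex, if_neg (by rw [h8]; simp), if_neg (by rw [h16]; simp)]
  | cons c v =>
    have hc : c = ' ' := by
      have h0 := List.head?_dropWhile_not (fun c => c != ' ') t
      rw [hdr] at h0
      simpa using h0
    subst hc
    set u := t.takeWhile (fun c => c != ' ') with hu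
    have htsplit : t = u ++ ' ' :: v := by
      conv_lhs => rw [← List.takeWhile_append_dropWhile (p := fun c => c != ' ') (l := t)]
      rw [hdr, hu]
    have hvsuf : v <:+ t := ⟨u ++ [' '], by simp [htsplit]⟩
    have hne8 : t ≠ "/context".toList := by
      intro he
      rw [he, show List.dropWhile (fun c => c != ' ') "/context".toList = [] from by decide] at hdr
      simp at hdr
    have hne16 : t ≠ "/context-report".toList := by
      intro he
      rw [he, show List.dropWhile (fun c => c != ' ') "/context-report".toList = [] from by decide] at hdr
      simp at hdr
    have hnex : ¬(t = "/context".toList ∨ t = "/context-report".toList) := by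
      rintro (h | h) <;> [exact hne8 h; exact hne16 h]
    have hpre8 : PySem.Chars.startswith t "/context ".toList = true ↔ u = "/context".toList := by
      constructor
      · intro hp
        obtain ⟨w, hw⟩ := (PySem.Chars.startswith_iff t _).mp hp
        have hT : t.takeWhile (fun c => c != ' ') = "/context".toList := by
          rw [← hw, show "/context ".toList = "/context".toList ++ [' '] from rfl,
            List.append_assoc, List.singleton_append]
          refine pv_takeWhile_mid _ _ (fun x hx h => ?_)
          subst h
          revert hx
          decide
        rw [hu, hT]
      · intro h8
        apply (PySem.Chars.startswith_iff t _).mpr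
        rw [htsplit, h8, show "/context ".toList = "/context".toList ++ [' '] from rfl]
        exact ⟨v, by simp⟩
    have hpre16 : PySem.Chars.startswith t "/context-report ".toList = true ↔ u = "/context-report".toList := by
      constructor
      · intro hp
        obtain ⟨w, hw⟩ := (PySem.Chars.startswith_iff t _).mp hp
        have hT : t.takeWhile (fun c => c != ' ') = "/context-report".toList := by
          rw [← hw, show "/context-report ".toList = "/context-report".toList ++ [' '] from rfl,
            List.append_assoc, List.singleton_append]
          refine pv_takeWhile_mid _ _ (fun x hx h => ?_)
          subst h
          revert hx
          decide
        rw [hu, hT]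
      · intro h16
        apply (PySem.Chars.startswith_iff t _).mpr
        rw [htsplit, h16, show "/context-report ".toList = "/context-report".toList ++ [' '] from rfl]
        exact ⟨v, by simp⟩
    simp only [List.nil_append]
    by_cases h8 : u = "/context".toList
    · have hp := hpre8.mpr h8
      have hslice : PySem.List.slice t (some 9) none = v := by
        rw [htsplit, h8, show ("/context".toList : List Char) ++ ' ' :: v = "/context ".toList ++ v from by simp]
        rw [PySem.List.slice_some_none]
        rw [show PySem.List.clampIdx ("/context ".toList ++ v).length 9 = 9 from by simp [PySem.List.clampIdx]]
        exact List.drop_left' (by decide)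
      rw [if_neg hnex, if_pos hp, if_pos (Or.inl h8)]
      unfold pvTailA
      rw [hslice]
      exact pv_tail_eq ht hvsuf
    · by_cases h16 : u = "/context-report".toList
      · have hp8 : PySem.Chars.startswith t "/context ".toList = false := by
          cases hb : PySem.Chars.startswith t "/context ".toList
          · rfl
          · exact absurd (hpre8.mp hb) h8
        have hp := hpre16.mpr h16
        have hslice : PySem.List.slice t (some 16) none = v := by
          rw [htsplit, h16, show ("/context-report".toList : List Char) ++ ' ' :: v = "/context-report ".toList ++ v from by simp]
          rw [PySem.List.slice_some_none]
          rw [show PySem.List.clampIdx ("/context-report ".toList ++ v).length 16 = 16 from by simp [PySem.List.clampIdx]]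
          exact List.drop_left' (by decide)
        rw [if_neg hnex, if_neg (by rw [hp8]; simp), if_pos hp, if_pos (Or.inr h16)]
        unfold pvTailA
        rw [hslice]
        exact pv_tail_eq ht hvsuf
      · have hp8 : PySem.Chars.startswith t "/context ".toList = false := by
          cases hb : PySem.Chars.startswith t "/context ".toList
          · rfl
          · exact absurd (hpre8.mp hb) h8
        have hp16 : PySem.Chars.startswith t "/context-report ".toList = false := by
          cases hb : PySem.Chars.startswith t "/context-report ".toList
          · rfl
          · exact absurd (hpre16.mp hb) h16
        rw [if_neg hnex, if_neg (by rw [hp8]; simp), if_neg (by rw [hp16]; simp),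
          if_neg (by rintro (h | h) <;> [exact h8 h; exact h16 h])]
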